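-- pv_equiv track=rewrite | github.com/wseungjin/SLRParser | lexical_analyzer.py | isTerminating
-- ===== SOURCE A (Python) =====
-- def isTerminating(stack):  #12 문장 종결기호
--   state = 'T0'
--   for i in stack:
--     if i==';' and state == 'T0':
--       state = 'T1'
--     else:
--       state = 'false'
--       break
--
--   if state == 'T1':
--     return True
--   else:
--     return False
-- ===== SOURCE B (Python) =====
-- def isTerminating(stack):
--     return list(stack) == [';']
-- ===== Notes on version B (the rewrite author's own statement) =====
-- stated objective: simpler
-- what changed: Replaced the T0/T1 state-machine loop with a single direct comparison of the materialized input to the literal [';'].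
import Mathlib
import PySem

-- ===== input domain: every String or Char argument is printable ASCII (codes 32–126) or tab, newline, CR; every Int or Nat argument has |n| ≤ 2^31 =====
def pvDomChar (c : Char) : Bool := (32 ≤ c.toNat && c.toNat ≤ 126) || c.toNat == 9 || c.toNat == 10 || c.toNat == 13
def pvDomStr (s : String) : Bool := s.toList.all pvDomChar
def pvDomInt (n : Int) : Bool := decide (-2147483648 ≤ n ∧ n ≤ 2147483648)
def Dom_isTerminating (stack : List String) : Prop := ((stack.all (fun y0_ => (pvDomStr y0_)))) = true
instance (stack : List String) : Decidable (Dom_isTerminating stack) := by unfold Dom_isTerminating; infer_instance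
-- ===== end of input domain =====

-- B replaces A's T0/T1 state-machine loop with a single direct list comparison (objective: simpler).


-- ===== PORT A =====
-- A walks the list with a two-value state machine (T0 -> T1 on ';', anything else breaks to 'false').
-- The for-loop with break is ported as structural recursion over (stack, state).
def isTerminatingLoop (xs : List String) (state : String) : String :=
  match xs with
  | [] => state
  | i :: rest =>
    if i == ";" && state == "T0" then isTerminatingLoop rest "T1"
    else "false"  -- break

def isTerminating (stack : List String) : Bool :=
  let state := isTerminatingLoop stack "T0"
  if state == "T1" then true else false

-- ===== PORT B =====
-- B: direct comparison to the one-element list [";"].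
def isTerminating_alt (stack : List String) : Bool := stack == [";"]

-- ===== PRECONDITION & SPEC =====
def Spec_isTerminating (stack : List String) (out : Bool) : Prop := out = isTerminating_alt stack
instance (stack : List String) (out : Bool) : Decidable (Spec_isTerminating stack out) := by unfold Spec_isTerminating; infer_instance

-- ===== CLAIM (what is proved, stated in full; the proofs are below) =====
def Claim_equal_isTerminating : Prop := ∀ (stack : List String), Dom_isTerminating stack → Spec_isTerminating stack (isTerminating stack)

-- ===== LEMMAS AND PROOFS =====

-- ===== VERDICT (by name: the statement is the Claim_ definition above) =====
theorem loop_char (xs : List String) :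
    isTerminatingLoop xs "T0" = "T1" ↔ xs = [";"] := by
  constructor
  · intro h
    match xs with
    | [] => simp [isTerminatingLoop] at h
    | i :: rest =>
      by_cases hi : i = ";"
      · subst hi
        match rest with
        | [] => rfl
        | j :: rest' =>
          simp only [isTerminatingLoop] at h
          split at h <;> simp_all
      · simp [isTerminatingLoop, hi] at h
  · rintro rfl
    rfl

theorem isTerminating_spec : Claim_equal_isTerminating := by
  intro stack _
  unfold Spec_isTerminating isTerminating isTerminating_alt
  by_cases h : stack = [";"]
  · subst h; decide
  · have := (loop_char stack).not.mpr h
    simp only [beq_iff_eq]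
    split
    · exact absurd (by assumption) (by simpa using this)
    · simp [h]
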